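-- pv_equiv track=rewrite | github.com/Code-Crew-Nexus/.github | generate_readme.py | infer_subject
-- ===== SOURCE A (Python) =====
-- SUBJECT_TOPIC_MAP = {
--     "ai": "AI",
--     "artificial-intelligence": "AI",
--     "computer-networks": "CN",
--     "csv": "Data Processing",
--     "daa": "DAA",
--     "database-management": "DBMS",
--     "database-management-system": "DBMS",
--     "dbms": "DBMS",
--     "design-analysis-algorithms": "DAA",
--     "machine-learning": "ML",
--     "ml": "ML",
--     "oop": "OOPs",
--     "oops": "OOPs",
--     "operating-systems": "OS",
--     "os": "OS",
--     "pbl": "PBL",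
-- }
--
-- SUBJECT_PRIORITY = ["DAA", "DBMS", "OOPs", "OS", "AI", "ML", "CN", "PBL", "Data Processing"]
--
-- SUBJECT_NAME_HINTS = {
--     "articulation": "DAA",
--     "page-replacement": "OS",
--     "paging": "OS",
--     "tic-tac-toe": "PBL",
-- }
--
-- def infer_subject(repo_name: str, topics: list[str]) -> str:
--     found_subjects: list[str] = []
--
--     for topic in topics:
--         mapped = SUBJECT_TOPIC_MAP.get(topic.lower())
--         if mapped and mapped not in found_subjects:
--             found_subjects.append(mapped)
--
--     for subject in SUBJECT_PRIORITY:
--         if subject in found_subjects: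
--             return subject
--
--     lowered = repo_name.lower()
--     for hint, mapped in SUBJECT_NAME_HINTS.items():
--         if hint in lowered:
--             return mapped
--
--     for key, mapped in SUBJECT_TOPIC_MAP.items():
--         if key in lowered:
--             return mapped
--
--     return "TBD"
-- ===== SOURCE B (Python) =====
-- SUBJECT_TOPIC_MAP = {
--     "ai": "AI",
--     "artificial-intelligence": "AI",
--     "computer-networks": "CN",
--     "csv": "Data Processing",
--     "daa": "DAA",
--     "database-management": "DBMS",
--     "database-management-system": "DBMS",
--     "dbms": "DBMS",
--     "design-analysis-algorithms": "DAA",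
--     "machine-learning": "ML",
--     "ml": "ML",
--     "oop": "OOPs",
--     "oops": "OOPs",
--     "operating-systems": "OS",
--     "os": "OS",
--     "pbl": "PBL",
-- }
--
-- SUBJECT_PRIORITY = ["DAA", "DBMS", "OOPs", "OS", "AI", "ML", "CN", "PBL", "Data Processing"]
--
-- RANK = {s: i for i, s in enumerate(SUBJECT_PRIORITY)}
--
-- SUBJECT_NAME_HINTS = {
--     "articulation": "DAA",
--     "page-replacement": "OS",
--     "paging": "OS",
--     "tic-tac-toe": "PBL",
-- }
--
-- def infer_subject(repo_name: str, topics: list[str]) -> str: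
--     # single min-tracking pass: keep the (rank, subject) with the smallest priority rank
--     best = None  # (rank, subject)
--     for topic in topics:
--         mapped = SUBJECT_TOPIC_MAP.get(topic.lower())
--         if mapped is not None:
--             r = RANK.get(mapped)
--             if r is not None and (best is None or r < best[0]):
--                 best = (r, mapped)
--     if best is not None:
--         return best[1]
--
--     lowered = repo_name.lower()
--     for hint, mapped in SUBJECT_NAME_HINTS.items():
--         if hint in lowered:
--             return mapped
--     for key, mapped in SUBJECT_TOPIC_MAP.items():
--         if key in lowered:
--             return mapped
--     return "TBD"
-- ===== Notes on version B (the rewrite author's own statement) =====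
-- stated objective: alternative
-- what changed: Replaces A's two-pass head (build a dedup list of mapped subjects, then scan SUBJECT_PRIORITY for the first member) with one min-tracking pass over topics that keeps the mapped subject of smallest precomputed priority rank; the name-hint and substring fallbacks are unchanged.
import Mathlib
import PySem

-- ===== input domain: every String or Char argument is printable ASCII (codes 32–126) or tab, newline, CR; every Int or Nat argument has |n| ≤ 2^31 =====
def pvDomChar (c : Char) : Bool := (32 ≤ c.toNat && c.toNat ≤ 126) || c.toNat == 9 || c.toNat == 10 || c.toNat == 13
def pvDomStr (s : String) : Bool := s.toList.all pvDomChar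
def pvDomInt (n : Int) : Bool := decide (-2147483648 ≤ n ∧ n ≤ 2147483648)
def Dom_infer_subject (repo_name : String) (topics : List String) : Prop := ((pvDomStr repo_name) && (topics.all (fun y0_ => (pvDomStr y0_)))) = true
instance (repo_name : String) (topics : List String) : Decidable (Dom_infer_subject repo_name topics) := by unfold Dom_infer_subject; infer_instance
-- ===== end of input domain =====

-- B replaces A's dedup-list-then-priority-scan head with a single min-rank tracking pass; the fallback tail is the same.

-- module-level constants shared by both Pythons
def pvTopicMap : PySem.Dict String String := PySem.Dict.mk
  [("ai", "AI"), ("artificial-intelligence", "AI"), ("computer-networks", "CN"),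
   ("csv", "Data Processing"), ("daa", "DAA"), ("database-management", "DBMS"),
   ("database-management-system", "DBMS"), ("dbms", "DBMS"),
   ("design-analysis-algorithms", "DAA"), ("machine-learning", "ML"), ("ml", "ML"),
   ("oop", "OOPs"), ("oops", "OOPs"), ("operating-systems", "OS"), ("os", "OS"),
   ("pbl", "PBL")]

def pvPriority : List String := ["DAA", "DBMS", "OOPs", "OS", "AI", "ML", "CN", "PBL", "Data Processing"]

def pvNameHints : PySem.Dict String String := PySem.Dict.mk
  [("articulation", "DAA"), ("page-replacement", "OS"), ("paging", "OS"), ("tic-tac-toe", "PBL")]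

-- ===== PORT A =====
def infer_subject (repo_name : String) (topics : List String) : String :=
  let found_subjects : List String := topics.foldl (fun found_subjects topic =>
    match pvTopicMap.get? (PySem.Str.lower topic) with
    | some mapped =>
        if mapped ≠ "" ∧ mapped ∉ found_subjects then found_subjects ++ [mapped] else found_subjects
    | none => found_subjects) []
  match pvPriority.find? (fun subject => decide (subject ∈ found_subjects)) with
  | some subject => subject
  | none =>
    let lowered := PySem.Str.lower repo_name
    match pvNameHints.items.find? (fun p => PySem.Str.isIn p.1 lowered) with
    | some p => p.2
    | none =>
      match pvTopicMap.items.find? (fun p => PySem.Str.isIn p.1 lowered) with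
      | some p => p.2
      | none => "TBD"

-- ===== PORT B =====
-- RANK = {s: i for i, s in enumerate(SUBJECT_PRIORITY)}, written out
def pvRank : PySem.Dict String Int := PySem.Dict.mk
  [("DAA", 0), ("DBMS", 1), ("OOPs", 2), ("OS", 3), ("AI", 4), ("ML", 5), ("CN", 6),
   ("PBL", 7), ("Data Processing", 8)]

def infer_subject_alt (repo_name : String) (topics : List String) : String :=
  let best : Option (Int × String) := topics.foldl (fun best topic =>
    match pvTopicMap.get? (PySem.Str.lower topic) with
    | some mapped =>
        match pvRank.get? mapped with
        | some r =>
            match best with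
            | none => some (r, mapped)
            | some b => if r < b.1 then some (r, mapped) else some b
        | none => best
    | none => best) none
  match best with
  | some b => b.2
  | none =>
    let lowered := PySem.Str.lower repo_name
    match pvNameHints.items.find? (fun p => PySem.Str.isIn p.1 lowered) with
    | some p => p.2
    | none =>
      match pvTopicMap.items.find? (fun p => PySem.Str.isIn p.1 lowered) with
      | some p => p.2
      | none => "TBD"

-- ===== PRECONDITION & SPEC =====
def Spec_infer_subject (repo_name : String) (topics : List String) (out : String) : Prop := out = infer_subject_alt repo_name topics
instance (repo_name : String) (topics : List String) (out : String) : Decidable (Spec_infer_subject repo_name topics out) := by unfold Spec_infer_subject; infer_instance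

-- ===== CLAIM (what is proved, stated in full; the proofs are below) =====
def Claim_equal_infer_subject : Prop := ∀ (repo_name : String) (topics : List String), Dom_infer_subject repo_name topics → Spec_infer_subject repo_name topics (infer_subject repo_name topics)

-- ===== LEMMAS AND PROOFS =====

-- A's loop step and B's loop step, as named functions (definitionally the inline lambdas of the ports)
def pvStepA (found_subjects : List String) (topic : String) : List String :=
  match pvTopicMap.get? (PySem.Str.lower topic) with
  | some mapped =>
      if mapped ≠ "" ∧ mapped ∉ found_subjects then found_subjects ++ [mapped] else found_subjects
  | none => found_subjects

def pvStepB (best : Option (Int × String)) (topic : String) : Option (Int × String) :=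
  match pvTopicMap.get? (PySem.Str.lower topic) with
  | some mapped =>
      match pvRank.get? mapped with
      | some r =>
          match best with
          | none => some (r, mapped)
          | some b => if r < b.1 then some (r, mapped) else some b
      | none => best
  | none => best

-- the invariant relating A's dedup list to B's best (rank, subject)
def pvInv (found : List String) (best : Option (Int × String)) : Prop :=
  match best with
  | none => ∀ s ∈ pvPriority, s ∉ found
  | some (r, m) => ∃ n : Nat, r = (n : Int) ∧ pvPriority[n]? = some m ∧ m ∈ found ∧
      ∀ i < n, ∀ s, pvPriority[i]? = some s → s ∉ found

lemma pvRank_some (m : String) (r : Int) (h : pvRank.get? m = some r) :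
    ∃ n : Nat, r = (n : Int) ∧ pvPriority[n]? = some m ∧ ∀ i < n, pvPriority[i]? ≠ some m := by
  by_cases hm : m ∈ pvPriority
  · simp only [pvPriority, List.mem_cons, List.not_mem_nil, or_false] at hm
    rcases hm with h'|h'|h'|h'|h'|h'|h'|h'|h'
    · subst h'
      have hv : pvRank.get? "DAA" = some 0 := by decide
      rw [hv] at h
      exact ⟨0, by injection h with h; omega, by decide, by decide⟩
    · subst h'
      have hv : pvRank.get? "DBMS" = some 1 := by decide
      rw [hv] at h
      exact ⟨1, by injection h with h; omega, by decide, by decide⟩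
    · subst h'
      have hv : pvRank.get? "OOPs" = some 2 := by decide
      rw [hv] at h
      exact ⟨2, by injection h with h; omega, by decide, by decide⟩
    · subst h'
      have hv : pvRank.get? "OS" = some 3 := by decide
      rw [hv] at h
      exact ⟨3, by injection h with h; omega, by decide, by decide⟩
    · subst h'
      have hv : pvRank.get? "AI" = some 4 := by decide
      rw [hv] at h
      exact ⟨4, by injection h with h; omega, by decide, by decide⟩
    · subst h'
      have hv : pvRank.get? "ML" = some 5 := by decide
      rw [hv] at h
      exact ⟨5, by injection h with h; omega, by decide, by decide⟩
    · subst h'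
      have hv : pvRank.get? "CN" = some 6 := by decide
      rw [hv] at h
      exact ⟨6, by injection h with h; omega, by decide, by decide⟩
    · subst h'
      have hv : pvRank.get? "PBL" = some 7 := by decide
      rw [hv] at h
      exact ⟨7, by injection h with h; omega, by decide, by decide⟩
    · subst h'
      have hv : pvRank.get? "Data Processing" = some 8 := by decide
      rw [hv] at h
      exact ⟨8, by injection h with h; omega, by decide, by decide⟩
  · exfalso
    have : pvRank.get? m = none := by
      rw [PySem.Dict.get?_eq_none_iff_not_mem_keys]
      simpa [pvRank, pvPriority, PySem.Dict.keys_mk] using hm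
    simp [this] at h

lemma pvRank_none (m : String) (h : pvRank.get? m = none) : m ∉ pvPriority := by
  rw [PySem.Dict.get?_eq_none_iff_not_mem_keys] at h
  simpa [pvRank, pvPriority, PySem.Dict.keys_mk] using h

lemma pvMem_stepA (found : List String) (topic s : String) :
    s ∈ pvStepA found topic ↔ s ∈ found ∨
      (pvTopicMap.get? (PySem.Str.lower topic) = some s ∧ s ≠ "") := by
  unfold pvStepA
  cases hg : pvTopicMap.get? (PySem.Str.lower topic) with
  | none => simp
  | some mapped =>
      dsimp only
      by_cases hc : mapped ≠ "" ∧ mapped ∉ found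
      · rw [if_pos hc]
        simp only [List.mem_append, List.mem_singleton, Option.some.injEq]
        constructor
        · rintro (h|h)
          · exact Or.inl h
          · subst h; exact Or.inr ⟨rfl, hc.1⟩
        · rintro (h|⟨h1,h2⟩)
          · exact Or.inl h
          · subst h1; exact Or.inr rfl
      · rw [if_neg hc]
        push Not at hc
        simp only [Option.some.injEq]
        constructor
        · exact Or.inl
        · rintro (h|⟨h1,h2⟩)
          · exact h
          · subst h1; exact hc h2

lemma pvInv_step (topic : String) (found : List String) (best : Option (Int × String))
    (h : pvInv found best) : pvInv (pvStepA found topic) (pvStepB best topic) := by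
  unfold pvStepB
  cases hg : pvTopicMap.get? (PySem.Str.lower topic) with
  | none =>
      have hA : pvStepA found topic = found := by unfold pvStepA; rw [hg]
      rw [hA]; exact h
  | some mapped =>
      dsimp only
      cases hr : pvRank.get? mapped with
      | none =>
          have hnp : mapped ∉ pvPriority := pvRank_none mapped hr
          cases best with
          | none =>
              unfold pvInv at h ⊢
              intro s hs
              rw [pvMem_stepA]
              rintro (h'|⟨h1,h2⟩)
              · exact h s hs h'
              · rw [hg] at h1
                injection h1 with h1; subst h1
                exact hnp hs
          | some b =>
              obtain ⟨m1, m2⟩ := b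
              unfold pvInv at h ⊢
              obtain ⟨n, hn, hpn, hmem, hlt⟩ := h
              refine ⟨n, hn, hpn, ?_, ?_⟩
              · rw [pvMem_stepA]; exact Or.inl hmem
              · intro i hi s hsi
                rw [pvMem_stepA]
                rintro (h'|⟨h1,h2⟩)
                · exact hlt i hi s hsi h'
                · rw [hg] at h1
                  injection h1 with h1; subst h1
                  exact hnp (List.mem_of_getElem? hsi)
      | some r =>
          dsimp only
          obtain ⟨n, hn, hpn, hlt⟩ := pvRank_some mapped r hr
          have hmm : mapped ∈ pvStepA found topic := by
            rw [pvMem_stepA]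
            by_cases hmem : mapped ∈ found
            · exact Or.inl hmem
            · refine Or.inr ⟨by rw [hg], ?_⟩
              intro he
              have hmp : mapped ∈ pvPriority := List.mem_of_getElem? hpn
              rw [he] at hmp
              exact absurd hmp (by decide)
          cases best with
          | none =>
              unfold pvInv at h ⊢
              refine ⟨n, hn, hpn, hmm, ?_⟩
              intro i hi s hsi
              rw [pvMem_stepA]
              rintro (h'|⟨h1,h2⟩)
              · exact h s (List.mem_of_getElem? hsi) h'
              · rw [hg] at h1
                injection h1 with h1; subst h1
                exact hlt i hi hsi
          | some b =>
              obtain ⟨m1, m2⟩ := b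
              dsimp only
              unfold pvInv at h ⊢
              obtain ⟨nb, hnb, hpnb, hmemb, hltb⟩ := h
              subst hn hnb
              by_cases hcmp : (n : Int) < (nb : Int)
              · rw [if_pos hcmp]
                refine ⟨n, rfl, hpn, hmm, ?_⟩
                intro i hi s hsi
                rw [pvMem_stepA]
                rintro (h'|⟨h1,h2⟩)
                · have : i < nb := by
                    have hnnb : n < nb := by exact_mod_cast hcmp
                    omega
                  exact hltb i this s hsi h'
                · rw [hg] at h1
                  injection h1 with h1; subst h1
                  exact hlt i hi hsi
              · rw [if_neg hcmp]
                refine ⟨nb, rfl, hpnb, ?_, ?_⟩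
                · rw [pvMem_stepA]; exact Or.inl hmemb
                · intro i hi s hsi
                  rw [pvMem_stepA]
                  rintro (h'|⟨h1,h2⟩)
                  · exact hltb i hi s hsi h'
                  · rw [hg] at h1
                    injection h1 with h1; subst h1
                    have hle : nb ≤ n := by
                      have := not_lt.mp hcmp
                      exact_mod_cast this
                    exact hlt i (lt_of_lt_of_le hi hle) hsi

lemma pvInv_fold (topics : List String) (found : List String) (best : Option (Int × String))
    (h : pvInv found best) : pvInv (topics.foldl pvStepA found) (topics.foldl pvStepB best) := by
  induction topics generalizing found best with
  | nil => exact h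
  | cons t ts ih => exact ih _ _ (pvInv_step t found best h)

lemma pvFind_some (l : List String) (found : List String) (n : Nat) (m : String)
    (h1 : l[n]? = some m) (h2 : m ∈ found)
    (h3 : ∀ i < n, ∀ s, l[i]? = some s → s ∉ found) :
    l.find? (fun s => decide (s ∈ found)) = some m := by
  induction l generalizing n with
  | nil => simp at h1
  | cons a t ih =>
      cases n with
      | zero =>
          simp only [List.getElem?_cons_zero, Option.some.injEq] at h1
          subst h1
          simp [h2]
      | succ k =>
          have ha : a ∉ found := h3 0 (Nat.succ_pos k) a (by simp)
          rw [List.find?_cons]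
          have hda : decide (a ∈ found) = false := by simpa using ha
          rw [hda]
          exact ih k (by simpa using h1) (fun i hi s hs => h3 (i+1) (by omega) s (by simpa using hs))

-- ===== VERDICT (by name: the statement is the Claim_ definition above) =====
theorem infer_subject_spec : Claim_equal_infer_subject := by
  intro repo_name topics _
  unfold Spec_infer_subject infer_subject infer_subject_alt
  dsimp only
  have hA : topics.foldl (fun found_subjects topic =>
      match pvTopicMap.get? (PySem.Str.lower topic) with
      | some mapped =>
          if mapped ≠ "" ∧ mapped ∉ found_subjects then found_subjects ++ [mapped] else found_subjects
      | none => found_subjects) [] = topics.foldl pvStepA [] := rfl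
  have hB : topics.foldl (fun best topic =>
      match pvTopicMap.get? (PySem.Str.lower topic) with
      | some mapped =>
          match pvRank.get? mapped with
          | some r =>
              match best with
              | none => some (r, mapped)
              | some b => if r < b.1 then some (r, mapped) else some b
          | none => best
      | none => best) none = topics.foldl pvStepB none := rfl
  rw [hA, hB]
  have hfold := pvInv_fold topics [] none (by unfold pvInv; intro s _ h; simp at h)
  cases hbest : topics.foldl pvStepB none with
  | none =>
      rw [hbest] at hfold
      unfold pvInv at hfold
      have hnone : pvPriority.find? (fun subject => decide (subject ∈ topics.foldl pvStepA [])) = none := by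
        rw [List.find?_eq_none]
        intro s hs
        simpa using hfold s hs
      rw [hnone]
  | some b =>
      obtain ⟨r, m⟩ := b
      rw [hbest] at hfold
      unfold pvInv at hfold
      obtain ⟨n, hn, hpn, hmem, hlt⟩ := hfold
      have hsome : pvPriority.find? (fun subject => decide (subject ∈ topics.foldl pvStepA [])) = some m :=
        pvFind_some pvPriority _ n m hpn hmem hlt
      rw [hsome]
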